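-- pv_equiv track=rewrite | github.com/JC-7991/CodingProjects-Repo- | DailyCoding/Weeks 4 - 9/Week 8/task55.py | shortURLToId
-- ===== SOURCE A (Python) =====
-- def shortURLToId(short):
--
--     id = 0
--     for i in short:
--
--         val_i = ord(i)
--
--         if(val_i >= ord('a') and val_i <= ord('z')):
--             id = id*62 + val_i - ord('a')
--
--         elif(val_i >= ord('A') and val_i <= ord('Z')):
--             id = id*62 + val_i - ord('A') + 26
--
--         else:
--             id = id*62 + val_i - ord('0') + 52
--
--     return id
-- ===== SOURCE B (Python) =====
-- def shortURLToId(short):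
--     def char_val(c):
--         o = ord(c)
--         if ord('a') <= o <= ord('z'):
--             return o - ord('a')
--         elif ord('A') <= o <= ord('Z'):
--             return o - ord('A') + 26
--         else:
--             return o - ord('0') + 52
--
--     vals = [char_val(c) for c in short]
--     id = 0
--     place = 1
--     for v in reversed(vals):
--         id += v * place
--         place *= 62
--     return id
-- ===== Notes on version B (the rewrite author's own statement) =====
-- stated objective: alternative
-- what changed: Replaces the single Horner accumulator loop with a two-pass positional power sum: first map each character to its base-62 digit value, then fold over the reversed digit list maintaining a running place value (62**i) and summing value*place.
import Mathlib
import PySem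

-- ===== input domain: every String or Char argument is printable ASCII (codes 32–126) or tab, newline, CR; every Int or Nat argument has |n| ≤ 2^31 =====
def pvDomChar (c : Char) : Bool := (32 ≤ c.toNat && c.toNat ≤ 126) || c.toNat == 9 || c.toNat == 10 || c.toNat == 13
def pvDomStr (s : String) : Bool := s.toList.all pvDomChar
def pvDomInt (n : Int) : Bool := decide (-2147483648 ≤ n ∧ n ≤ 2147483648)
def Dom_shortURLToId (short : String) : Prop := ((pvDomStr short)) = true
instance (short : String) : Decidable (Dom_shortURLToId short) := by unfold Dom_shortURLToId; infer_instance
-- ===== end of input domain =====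

-- B replaces A's Horner accumulator with a two-pass positional power sum (map to digit
-- values, then fold the reversed list with a running place value); same cost, different shape.

-- ===== PORT A =====
-- Horner step of A's loop body: branch order as in the Python.
def pvStepA (id : Int) (c : Char) : Int :=
  let val_i : Int := c.toNat
  if 97 ≤ val_i ∧ val_i ≤ 122 then id * 62 + val_i - 97
  else if 65 ≤ val_i ∧ val_i ≤ 90 then id * 62 + val_i - 65 + 26
  else id * 62 + val_i - 48 + 52

def shortURLToId (short : String) : Int :=
  short.toList.foldl pvStepA 0

-- ===== PORT B =====
-- Source B's char_val helper.
def pvCharVal (c : Char) : Int :=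
  let o : Int := c.toNat
  if 97 ≤ o ∧ o ≤ 122 then o - 97
  else if 65 ≤ o ∧ o ≤ 90 then o - 65 + 26
  else o - 48 + 52

def shortURLToId_alt (short : String) : Int :=
  let vals := short.toList.map pvCharVal
  (vals.reverse.foldl (fun (st : Int × Int) v => (st.1 + v * st.2, st.2 * 62)) (0, 1)).1

-- ===== PRECONDITION & SPEC =====
def Spec_shortURLToId (short : String) (out : Int) : Prop := out = shortURLToId_alt short
instance (short : String) (out : Int) : Decidable (Spec_shortURLToId short out) := by unfold Spec_shortURLToId; infer_instance

-- ===== CLAIM (what is proved, stated in full; the proofs are below) =====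
def Claim_equal_shortURLToId : Prop := ∀ (short : String), Dom_shortURLToId short → Spec_shortURLToId short (shortURLToId short)

-- ===== LEMMAS AND PROOFS =====

theorem pvStepA_eq (id : Int) (c : Char) : pvStepA id c = id * 62 + pvCharVal c := by
  simp only [pvStepA, pvCharVal]
  split_ifs <;> ring

-- Horner shift: fold from acc equals acc·62^n plus fold from 0.
theorem horner_shift (l : List Char) (acc : Int) :
    l.foldl pvStepA acc = acc * 62 ^ l.length + l.foldl pvStepA 0 := by
  induction l generalizing acc with
  | nil => simp
  | cons x l ih =>
    simp only [List.foldl_cons, List.length_cons]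
    rw [ih (pvStepA acc x), ih (pvStepA 0 x), pvStepA_eq, pvStepA_eq]
    ring

-- B's fold over the reversed digit list, started at (a, p), adds Horner(l)·p and multiplies p by 62^n.
theorem bfold_spec (l : List Char) (a p : Int) :
    (l.map pvCharVal).reverse.foldl (fun (st : Int × Int) v => (st.1 + v * st.2, st.2 * 62)) (a, p)
      = (a + (l.foldl pvStepA 0) * p, p * 62 ^ l.length) := by
  induction l generalizing a p with
  | nil => simp
  | cons x l ih =>
    simp only [List.map_cons, List.reverse_cons, List.foldl_append, List.foldl_cons,
      List.foldl_nil, List.length_cons, ih]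
    rw [horner_shift l (pvStepA 0 x), pvStepA_eq]
    rw [Prod.mk.injEq]
    exact ⟨by ring, by ring⟩

-- ===== VERDICT (by name: the statement is the Claim_ definition above) =====
theorem shortURLToId_spec : Claim_equal_shortURLToId := by
  intro short _
  unfold Spec_shortURLToId shortURLToId shortURLToId_alt
  simp only [bfold_spec]
  ring
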